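-- pv_equiv track=rewrite | github.com/Dominic1324/mymoon-Baekjoon | 백준/Silver/2621. 카드게임/카드게임.py | isconti
-- ===== SOURCE A (Python) =====
-- def isconti(li):
--     li.sort()
--     for i in range(len(li)):
--         if i == 0:
--             be = li[i]
--         elif be + 1 != li[i]:
--             return False
--         be = li[i]
--     return True
-- ===== SOURCE B (Python) =====
-- def isconti(li):
--     li.sort()
--     if not li:
--         return True
--     return li[-1] - li[0] == len(li) - 1 and len(set(li)) == len(li)
-- ===== Notes on version B (the rewrite author's own statement) =====
-- stated objective: simpler
-- what changed: replaces the pairwise consecutive scan with a closed-form test on the sorted list: max - min == len - 1 plus a set-size distinctness check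
import Mathlib
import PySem

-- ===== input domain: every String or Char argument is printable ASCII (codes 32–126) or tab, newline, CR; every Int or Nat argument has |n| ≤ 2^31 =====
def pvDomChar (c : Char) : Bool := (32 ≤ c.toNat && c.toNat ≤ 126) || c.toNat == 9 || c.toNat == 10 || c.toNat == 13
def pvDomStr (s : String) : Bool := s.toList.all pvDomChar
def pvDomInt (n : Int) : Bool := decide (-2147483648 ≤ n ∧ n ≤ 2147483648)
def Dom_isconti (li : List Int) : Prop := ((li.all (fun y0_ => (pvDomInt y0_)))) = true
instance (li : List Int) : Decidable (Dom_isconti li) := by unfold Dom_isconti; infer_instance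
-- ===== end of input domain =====

-- B replaces A's pairwise consecutive scan over the sorted list with a closed-form
-- max-min/length test plus a set-size distinctness check (objective: simpler).
-- Note: the Python A and B both sort the argument in place; the equivalence proved
-- here is about the return value (both perform the same mutation).

-- ===== PORT A =====
-- the loop body of A after the i == 0 iteration: 'be' is the previous element
def iscontiGo (be : Int) : List Int → Bool
  | [] => true
  | y :: ys => if be + 1 ≠ y then false else iscontiGo y ys

def isconti (li : List Int) : Bool :=
  match PySem.List.sorted li (fun x => x) false with
  | [] => true
  | x :: xs => iscontiGo x xs

-- ===== PORT B =====
def isconti_alt (li : List Int) : Bool :=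
  let s := PySem.List.sorted li (fun x => x) false
  if s.isEmpty then true
  else decide (PySem.List.pyGetD s (-1) 0 - PySem.List.pyGetD s 0 0 = (s.length : Int) - 1)
       && decide (PySem.Set.len (PySem.Set.ofList s) = (s.length : Int))

-- ===== PRECONDITION & SPEC =====
def Spec_isconti (li : List Int) (out : Bool) : Prop := out = isconti_alt li
instance (li : List Int) (out : Bool) : Decidable (Spec_isconti li out) := by unfold Spec_isconti; infer_instance

-- ===== CLAIM (what is proved, stated in full; the proofs are below) =====
def Claim_equal_isconti : Prop := ∀ (li : List Int), Dom_isconti li → Spec_isconti li (isconti li)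

-- ===== LEMMAS AND PROOFS =====

-- set(s) is a subsequence of s
theorem foldl_add_sublist (s : List Int) : ∀ acc : List Int,
    List.Sublist (List.foldl PySem.Set.add acc s) (acc ++ s) := by
  induction s with
  | nil => intro acc; simp
  | cons x s ih =>
    intro acc
    refine (ih (PySem.Set.add acc x)).trans ?_
    by_cases h : x ∈ acc
    · simp only [PySem.Set.add, PySem.Set.contains, List.contains_eq_mem, decide_eq_true_eq, if_pos h]
      exact (List.sublist_cons_self x s).append_left acc
    · simp only [PySem.Set.add, PySem.Set.contains, List.contains_eq_mem, decide_eq_true_eq, if_neg h, List.append_assoc]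
      exact List.Sublist.refl _

-- on a duplicate-free list, set(s) is s itself
theorem foldl_add_of_nodup (s : List Int) : ∀ acc : List Int,
    (acc ++ s).Nodup → List.foldl PySem.Set.add acc s = acc ++ s := by
  induction s with
  | nil => intro acc _; simp
  | cons x s ih =>
    intro acc hnd
    have hx : x ∉ acc := fun hmem => (List.disjoint_of_nodup_append hnd) hmem (by simp)
    have hadd : PySem.Set.add acc x = acc ++ [x] := by
      simp [PySem.Set.add, PySem.Set.contains, hx]
    rw [List.foldl_cons, hadd, ih (acc ++ [x]) (by simpa [List.append_assoc] using hnd)]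
    simp

theorem setlen_eq_iff (s : List Int) :
    (PySem.Set.ofList s).length = s.length ↔ s.Nodup := by
  constructor
  · intro h
    have hsub : List.Sublist (PySem.Set.ofList s) s := by
      rw [PySem.Set.ofList_eq_foldl]
      simpa using foldl_add_sublist s []
    have := hsub.eq_of_length h
    rw [← this]; exact PySem.Set.nodup_ofList s
  · intro h
    rw [PySem.Set.ofList_eq_foldl, foldl_add_of_nodup s [] (by simpa using h)]
    simp

-- the scan succeeds exactly when the list climbs by 1 each step; its last element then
theorem go_last (xs : List Int) : ∀ x : Int, iscontiGo x xs = true →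
    (x :: xs).getLast (List.cons_ne_nil x xs) = x + xs.length := by
  induction xs with
  | nil => intro x _; simp
  | cons y ys ih =>
    intro x h
    simp only [iscontiGo] at h
    split at h
    · exact absurd h (by simp)
    · rename_i hxy
      have hy : x + 1 = y := by omega
      rw [List.getLast_cons (List.cons_ne_nil y ys)]
      have := ih y h
      rw [this]
      simp; omega

theorem go_pairwise (xs : List Int) : ∀ x : Int, iscontiGo x xs = true →
    (x :: xs).Pairwise (· < ·) := by
  induction xs with
  | nil => intro x _; simp
  | cons y ys ih =>
    intro x h
    simp only [iscontiGo] at h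
    split at h
    · exact absurd h (by simp)
    · rename_i hxy
      have hy : x + 1 = y := by omega
      have hp := ih y h
      refine List.Pairwise.cons ?_ hp
      intro z hz
      rcases List.mem_cons.mp hz with rfl | hz
      · omega
      · have := (List.pairwise_cons.mp hp).1 z hz
        omega

theorem last_lower_bound (xs : List Int) : ∀ x : Int, (x :: xs).Pairwise (· < ·) →
    x + xs.length ≤ (x :: xs).getLast (List.cons_ne_nil x xs) := by
  induction xs with
  | nil => intro x _; simp
  | cons y ys ih =>
    intro x hp
    have hxy : x < y := (List.pairwise_cons.mp hp).1 y (by simp)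
    have := ih y (List.pairwise_cons.mp hp).2
    rw [List.getLast_cons (List.cons_ne_nil y ys)]
    simp only [List.length_cons]
    push_cast
    omega

theorem go_of_last (xs : List Int) : ∀ x : Int, (x :: xs).Pairwise (· < ·) →
    (x :: xs).getLast (List.cons_ne_nil x xs) = x + xs.length →
    iscontiGo x xs = true := by
  induction xs with
  | nil => intro x _ _; simp [iscontiGo]
  | cons y ys ih =>
    intro x hp hl
    have hxy : x < y := (List.pairwise_cons.mp hp).1 y (by simp)
    have hp' := (List.pairwise_cons.mp hp).2
    have hlb := last_lower_bound ys y hp'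
    rw [List.getLast_cons (List.cons_ne_nil y ys)] at hl
    simp only [List.length_cons] at hl
    push_cast at hl
    have hy : y = x + 1 := by omega
    have hl' : (y :: ys).getLast (List.cons_ne_nil y ys) = y + ys.length := by omega
    simp only [iscontiGo]
    rw [if_neg (by omega)]
    exact ih y hp' hl'

theorem main_eq (li : List Int) : isconti li = isconti_alt li := by
  unfold isconti isconti_alt
  have hp := PySem.List.sorted_pairwise li (fun x => x)
  cases hs : PySem.List.sorted li (fun x => x) false with
  | nil => simp
  | cons x xs =>
    rw [hs] at hp
    simp only [List.isEmpty_cons, Bool.false_eq_true, if_false]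
    rw [PySem.List.pyGetD_neg_one (x :: xs) 0 (List.cons_ne_nil x xs)]
    rw [PySem.List.pyGetD_zero_cons]
    have hlen : PySem.Set.len (PySem.Set.ofList (x :: xs)) = ((PySem.Set.ofList (x :: xs)).length : Int) := by
      simp [PySem.Set.len]
    rw [hlen]
    cases hgo : iscontiGo x xs with
    | true =>
      have hlast := go_last xs x hgo
      have hpw := go_pairwise xs x hgo
      have hnd : (x :: xs).Nodup := hpw.imp (fun h => ne_of_lt h)
      have hset := (setlen_eq_iff (x :: xs)).mpr hnd
      simp only [List.length_cons, hlast, hset]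
      simp
      try push_cast
      try omega
    | false =>
      symm
      simp only [Bool.and_eq_false_iff, decide_eq_false_iff_not]
      by_cases hnd : (x :: xs).Nodup
      · left
        have hpw : (x :: xs).Pairwise (· < ·) := by
          have := List.Pairwise.and hp hnd
          exact this.imp (fun ⟨hle, hne⟩ => lt_of_le_of_ne hle hne)
        intro heq
        have : (x :: xs).getLast (List.cons_ne_nil x xs) = x + xs.length := by
          simp only [List.length_cons] at heq; push_cast at heq; omega
        exact absurd (go_of_last xs x hpw this) (by simp [hgo])
      · right
        intro heq
        exact hnd ((setlen_eq_iff (x :: xs)).mp (by exact_mod_cast heq))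

-- ===== VERDICT (by name: the statement is the Claim_ definition above) =====
theorem isconti_spec : Claim_equal_isconti := by
  intro li _
  unfold Spec_isconti
  exact main_eq li
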